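-- pv_equiv track=rewrite | github.com/algomaster99/reproducible-central | text-clustering.py | process_details
-- ===== SOURCE A (Python) =====
-- def process_details(details):
--     s = ''
--     for detail in details:
--         unified_diff = detail.get('unified_diff', '')
--         if unified_diff:
--             s += unified_diff
--     if 'details' in details:
--         s += process_details(details['details'])
--
--     return s
-- ===== SOURCE B (Python) =====
-- def process_details(details):
--     # Under the list-of-dicts input type the 'details' in details test of A compares a
--     # string against dict elements and is always False, so the recursion is dead code:
--     # the result is just the concatenation of the diff fields (empty ones add nothing).
--     return ''.join(detail.get('unified_diff', '') for detail in details)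
-- ===== Notes on version B (the rewrite author's own statement) =====
-- stated objective: simpler
-- what changed: Replaces the accumulate-with-truthiness-filter loop plus the dead self-recursion (the string-in-list membership test never fires on a list of dicts) with a single join over the mapped diff fields.
import Mathlib
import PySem

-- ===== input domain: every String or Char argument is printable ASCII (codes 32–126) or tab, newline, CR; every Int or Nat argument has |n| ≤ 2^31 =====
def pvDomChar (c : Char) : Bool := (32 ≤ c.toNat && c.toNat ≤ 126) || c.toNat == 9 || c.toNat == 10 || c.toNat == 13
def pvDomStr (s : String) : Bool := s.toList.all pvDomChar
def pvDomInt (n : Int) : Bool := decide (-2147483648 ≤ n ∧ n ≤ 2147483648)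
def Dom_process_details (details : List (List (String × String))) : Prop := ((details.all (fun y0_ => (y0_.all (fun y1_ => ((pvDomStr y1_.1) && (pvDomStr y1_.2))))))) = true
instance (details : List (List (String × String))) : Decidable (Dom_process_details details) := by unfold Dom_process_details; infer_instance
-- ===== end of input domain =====

-- B replaces A's accumulator loop (and its dead recursive branch) with a single join over
-- the mapped diff fields; objective: simpler.


-- ===== PORT A =====
-- `'details' in details` in Python compares the string against each dict element; a str is
-- never == a dict, so on this input type the membership is False and the recursive branch is
-- unreachable; ported as the same any-over-elements test with the always-false comparison.
def process_details (details : List (List (String × String))) : String :=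
  let s := details.foldl (fun s detail =>
    let unified_diff := PySem.Dict.getD (PySem.Dict.mk detail) "unified_diff" ""
    if unified_diff ≠ "" then s ++ unified_diff else s) ""
  if details.any (fun _detail => false) then s ++ "" else s

-- ===== PORT B =====
def process_details_alt (details : List (List (String × String))) : String :=
  PySem.Str.join "" (details.map (fun detail => PySem.Dict.getD (PySem.Dict.mk detail) "unified_diff" ""))

-- ===== PRECONDITION & SPEC =====
def Spec_process_details (details : List (List (String × String))) (out : String) : Prop := out = process_details_alt details
instance (details : List (List (String × String))) (out : String) : Decidable (Spec_process_details details out) := by unfold Spec_process_details; infer_instance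

-- ===== CLAIM (what is proved, stated in full; the proofs are below) =====
def Claim_equal_process_details : Prop := ∀ (details : List (List (String × String))), Dom_process_details details → Spec_process_details details (process_details details)

-- ===== LEMMAS AND PROOFS =====

theorem join_nil_sep (l : List (List Char)) : PySem.Chars.join [] l = l.flatten := by
  induction l with
  | nil => rfl
  | cons a t ih => cases t <;> simp_all [PySem.Chars.join, List.intercalate, List.intersperse]

theorem pd_foldl_join (details : List (List (String × String))) (s : String) :
    details.foldl (fun s detail =>
      let unified_diff := PySem.Dict.getD (PySem.Dict.mk detail) "unified_diff" ""
      if unified_diff ≠ "" then s ++ unified_diff else s) s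
    = s ++ PySem.Str.join "" (details.map (fun detail => PySem.Dict.getD (PySem.Dict.mk detail) "unified_diff" "")) := by
  induction details generalizing s with
  | nil => simp [PySem.Str.join]
  | cons d t ih =>
      simp only [List.foldl_cons, List.map_cons, ih]
      by_cases h : PySem.Dict.getD (PySem.Dict.mk d) "unified_diff" "" = ""
      · simp [h, PySem.Str.join, join_nil_sep]
      · simp [h, PySem.Str.join, join_nil_sep, String.append_assoc]

-- ===== VERDICT (by name: the statement is the Claim_ definition above) =====
theorem process_details_spec : Claim_equal_process_details := by
  intro details _
  unfold Spec_process_details process_details process_details_alt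
  rw [pd_foldl_join]
  simp
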